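-- pv_equiv track=rewrite | github.com/impresso/federal-gazette | lib/bleualign_articles.py | corpus_figures
-- ===== SOURCE A (Python) =====
-- def split_articles(text, string):
--     """splits a given string into articles"""
--
--     return [
--         article
--         for article in text.split(string)
--         if article != "\n" and article != " \n"
--     ]
--
-- def corpus_figures(articles, prefix):
--
--     metadata = {}
--
--     content = " ".join(articles)
--     metadata[prefix + "_n_chars"] = len(content)
--     metadata[prefix + "_n_tokens"] = len(content.split())
--     n_sents = sum([len(split_articles(art, "\n")) for art in articles])
--     metadata[prefix + "_n_sentences"] = n_sents
--
--     return metadata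
-- ===== SOURCE B (Python) =====
-- def corpus_figures(articles, prefix):
--     # Single pass over the articles: three running totals instead of building the
--     # joined corpus string; the join's separator spaces are accounted for in closed form.
--     n_chars = 0
--     n_tokens = 0
--     n_sents = 0
--     for a in articles:
--         n_chars += len(a)
--         n_tokens += len(a.split())
--         n_sents += a.count("\n") + 1
--     if articles:
--         n_chars += len(articles) - 1
--     return {
--         prefix + "_n_chars": n_chars,
--         prefix + "_n_tokens": n_tokens,
--         prefix + "_n_sentences": n_sents,
--     }
-- ===== Notes on version B (the rewrite author's own statement) =====
-- stated objective: alternative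
-- what changed: B makes one pass over the articles accumulating three running totals (chars, whitespace tokens, '\n'-count+1 sentences) and adds the len(articles)-1 joining spaces in closed form, instead of materialising the ' '-joined corpus string, splitting it, and re-splitting every article through the dead '\n'/' \n' filter.
import Mathlib
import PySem

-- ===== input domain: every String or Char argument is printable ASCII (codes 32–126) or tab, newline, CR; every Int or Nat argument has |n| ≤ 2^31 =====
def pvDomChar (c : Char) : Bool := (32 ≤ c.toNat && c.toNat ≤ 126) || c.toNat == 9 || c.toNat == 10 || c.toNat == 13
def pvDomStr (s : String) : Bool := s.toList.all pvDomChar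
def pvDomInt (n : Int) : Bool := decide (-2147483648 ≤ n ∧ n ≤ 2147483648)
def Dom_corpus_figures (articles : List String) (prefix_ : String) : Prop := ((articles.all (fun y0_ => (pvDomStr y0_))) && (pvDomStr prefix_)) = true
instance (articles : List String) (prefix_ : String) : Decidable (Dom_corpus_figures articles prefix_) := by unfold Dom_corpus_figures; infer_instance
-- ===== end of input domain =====

-- B replaces A's join-then-measure pass with one accumulation loop over the articles,
-- adding the join's len(articles)-1 separator spaces in closed form (objective: alternative decomposition).

-- ===== PORT A =====
-- text.split(string) raises only for string = ""; corpus_figures calls split_articles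
-- solely with the literal "\n", where split? is always `some` and the getD [] is unreached.
def split_articles (text string_ : String) : List String :=
  ((PySem.Str.split? text string_).getD []).filter
    (fun article => article != "\n" && article != " \n")

def corpus_figures (articles : List String) (prefix_ : String) : List (String × Int) :=
  let metadata : PySem.Dict String Int := PySem.Dict.empty
  let content : String := PySem.Str.join " " articles
  let metadata := metadata.insert (prefix_ ++ "_n_chars") (PySem.Str.len content)
  let metadata := metadata.insert (prefix_ ++ "_n_tokens") ((PySem.Str.split₀ content).length : Int)
  let n_sents : Int := (articles.map (fun art => ((split_articles art "\n").length : Int))).sum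
  let metadata := metadata.insert (prefix_ ++ "_n_sentences") n_sents
  metadata.items

-- ===== PORT B =====
def corpus_figures_alt (articles : List String) (prefix_ : String) : List (String × Int) :=
  let t : Int × Int × Int :=
    articles.foldl
      (fun acc a =>
        (acc.1 + PySem.Str.len a,
         acc.2.1 + ((PySem.Str.split₀ a).length : Int),
         acc.2.2 + ((PySem.Str.count a "\n" : Int) + 1)))
      (0, 0, 0)
  let n_chars : Int := if articles.isEmpty then t.1 else t.1 + (articles.length : Int) - 1
  ((((PySem.Dict.empty : PySem.Dict String Int).insert (prefix_ ++ "_n_chars") n_chars).insert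
      (prefix_ ++ "_n_tokens") t.2.1).insert
    (prefix_ ++ "_n_sentences") t.2.2).items

-- ===== PRECONDITION & SPEC =====
def Spec_corpus_figures (articles : List String) (prefix_ : String) (out : List (String × Int)) : Prop := out = corpus_figures_alt articles prefix_
instance (articles : List String) (prefix_ : String) (out : List (String × Int)) : Decidable (Spec_corpus_figures articles prefix_ out) := by unfold Spec_corpus_figures; infer_instance

-- ===== CLAIM (what is proved, stated in full; the proofs are below) =====
def Claim_equal_corpus_figures : Prop := ∀ (articles : List String) (prefix_ : String), Dom_corpus_figures articles prefix_ → Spec_corpus_figures articles prefix_ (corpus_figures articles prefix_)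

-- ===== LEMMAS AND PROOFS =====

-- The three per-article totals B accumulates, as sums over the article list.
def sumChars (articles : List String) : Int := (articles.map PySem.Str.len).sum
def sumToks (articles : List String) : Int :=
  (articles.map (fun a => ((PySem.Str.split₀ a).length : Int))).sum
def sumSents (articles : List String) : Int :=
  (articles.map (fun a => ((PySem.Str.count a "\n" : Int) + 1))).sum

-- B's fold computes exactly those three sums.
theorem valB_fold (articles : List String) (c t s : Int) :
    articles.foldl
      (fun acc a =>
        (acc.1 + PySem.Str.len a,
         acc.2.1 + ((PySem.Str.split₀ a).length : Int),
         acc.2.2 + ((PySem.Str.count a "\n" : Int) + 1)))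
      (c, t, s)
    = (c + sumChars articles, t + sumToks articles, s + sumSents articles) := by
  induction articles generalizing c t s with
  | nil => simp [sumChars, sumToks, sumSents]
  | cons a l ih =>
      simp only [List.foldl_cons, ih, sumChars, sumToks, sumSents, List.map_cons, List.sum_cons]
      refine Prod.ext ?_ (Prod.ext ?_ ?_) <;> simp <;> ring

-- length of ' '.join at the char level
theorem length_intercalate_space (ls : List (List Char)) (h : ls ≠ []) :
    (List.intercalate [' '] ls).length + 1 = (ls.map List.length).sum + ls.length := by
  induction ls with
  | nil => exact absurd rfl h
  | cons a l ih =>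
      cases l with
      | nil => simp [List.intercalate]
      | cons b l' =>
          have hc : List.intercalate [' '] (a :: b :: l') =
              a ++ [' '] ++ List.intercalate [' '] (b :: l') := by
            simp [List.intercalate]
          rw [hc]
          have h2 := ih (List.cons_ne_nil _ _)
          simp only [List.map_cons, List.sum_cons, List.length_cons, List.length_append,
            List.length_nil] at h2 ⊢
          omega

-- one-step equations of split₀'s worker (its own recursion, spelled out per case)
theorem split0_go_nil (cur : List Char) (acc : List (List Char)) :
    PySem.Chars.split₀.go [] cur acc
      = if cur.isEmpty then acc.reverse else (cur.reverse :: acc).reverse := by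
  rw [PySem.Chars.split₀.go]

theorem split0_go_cons (c : Char) (rest cur : List Char) (acc : List (List Char)) :
    PySem.Chars.split₀.go (c :: rest) cur acc
      = if PySem.Chars.isspace c then
          (if cur.isEmpty then PySem.Chars.split₀.go rest [] acc
           else PySem.Chars.split₀.go rest [] (cur.reverse :: acc))
        else PySem.Chars.split₀.go rest (c :: cur) acc := by
  rw [PySem.Chars.split₀.go]

-- split₀.go: the accumulator contributes its length to the result's length
theorem split0_go_acc (xs : List Char) (cur : List Char) (acc : List (List Char)) :
    (PySem.Chars.split₀.go xs cur acc).length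
      = acc.length + (PySem.Chars.split₀.go xs cur []).length := by
  induction xs generalizing cur acc with
  | nil => by_cases h : cur.isEmpty <;> simp [split0_go_nil, h]
  | cons c rest ih =>
      by_cases hs : PySem.Chars.isspace c
      · by_cases hc : cur.isEmpty
        · simp only [split0_go_cons, hs, hc, if_true]
          exact ih [] acc
        · simp only [split0_go_cons, hs, hc, if_true, Bool.false_eq_true, if_false]
          rw [ih [] (cur.reverse :: acc), ih [] [cur.reverse]]
          simp only [List.length_cons, List.length_nil]
          omega
      · simp only [split0_go_cons, hs, Bool.false_eq_true, if_false]
        exact ih _ _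

-- split₀.go splits at a separating space: token counts add up
theorem split0_go_space (xs ys : List Char) (cur : List Char) (acc : List (List Char)) :
    (PySem.Chars.split₀.go (xs ++ ' ' :: ys) cur acc).length
      = (PySem.Chars.split₀.go xs cur acc).length
        + (PySem.Chars.split₀.go ys [] []).length := by
  induction xs generalizing cur acc with
  | nil =>
      have hs : PySem.Chars.isspace ' ' = true := by decide
      by_cases hc : cur.isEmpty <;>
        simp only [List.nil_append, split0_go_cons, split0_go_nil, hs, hc, if_true,
          Bool.false_eq_true, if_false] <;>
        rw [split0_go_acc] <;> simp
  | cons c rest ih =>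
      by_cases hs : PySem.Chars.isspace c <;> by_cases hc : cur.isEmpty <;>
        simp only [List.cons_append, split0_go_cons, hs, hc, if_true,
          Bool.false_eq_true, if_false] <;>
        exact ih _ _

-- token count of the ' '-join = sum of the per-article token counts (char level)
theorem split0_intercalate (ls : List (List Char)) :
    (PySem.Chars.split₀ (List.intercalate [' '] ls)).length
      = (ls.map (fun l => (PySem.Chars.split₀ l).length)).sum := by
  induction ls with
  | nil => simp [List.intercalate, PySem.Chars.split₀, split0_go_nil]
  | cons a l ih =>
      cases l with
      | nil => simp [List.intercalate]
      | cons b l' =>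
          have hc : List.intercalate [' '] (a :: b :: l') =
              a ++ ' ' :: List.intercalate [' '] (b :: l') := by
            simp [List.intercalate]
          simp only [PySem.Chars.split₀] at *
          rw [hc, split0_go_space, ih]
          simp

-- one-step equations of splitOn's worker at separator ['\n']
theorem splitOn_go_nl_zero (l cur : List Char) (acc : List (List Char)) :
    PySem.Chars.splitOn.go ['\n'] 0 l cur acc = ((cur.reverse ++ l) :: acc).reverse := by
  rw [PySem.Chars.splitOn.go.eq_def]

theorem splitOn_go_nl_nil (fuel : Nat) (cur : List Char) (acc : List (List Char)) :
    PySem.Chars.splitOn.go ['\n'] (fuel + 1) [] cur acc = (cur.reverse :: acc).reverse := by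
  rw [PySem.Chars.splitOn.go.eq_def]

theorem splitOn_go_nl_cons (fuel : Nat) (c : Char) (rest cur : List Char) (acc : List (List Char)) :
    PySem.Chars.splitOn.go ['\n'] (fuel + 1) (c :: rest) cur acc
      = if c = '\n' then PySem.Chars.splitOn.go ['\n'] fuel rest [] (cur.reverse :: acc)
        else PySem.Chars.splitOn.go ['\n'] fuel rest (c :: cur) acc := by
  rw [PySem.Chars.splitOn.go.eq_def]
  by_cases h : c = '\n'
  · subst h; simp [List.isPrefixOf]
  · simp [List.isPrefixOf, h, Ne.symm h]

-- splitOn.go with separator ['\n']: no produced piece contains '\n'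
theorem splitOn_go_no_nl (fuel : Nat) (l cur : List Char) (acc : List (List Char))
    (hf : l.length ≤ fuel) (hcur : '\n' ∉ cur) (hacc : ∀ p ∈ acc, '\n' ∉ p) :
    ∀ p ∈ PySem.Chars.splitOn.go ['\n'] fuel l cur acc, '\n' ∉ p := by
  induction fuel generalizing l cur acc with
  | zero =>
      have hl : l = [] := by cases l <;> simp_all
      subst hl
      rw [splitOn_go_nl_zero]
      intro p hp
      simp only [List.append_nil, List.mem_reverse, List.mem_cons] at hp
      rcases hp with h | h
      · subst h; simpa using hcur
      · exact hacc _ h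
  | succ fuel ih =>
      cases l with
      | nil =>
          rw [splitOn_go_nl_nil]
          intro p hp
          simp only [List.mem_reverse, List.mem_cons] at hp
          rcases hp with h | h
          · subst h; simpa using hcur
          · exact hacc _ h
      | cons c rest =>
          rw [splitOn_go_nl_cons]
          by_cases hcn : c = '\n'
          · subst hcn
            simp only [if_true]
            refine ih rest [] (cur.reverse :: acc) (by simpa using hf) (by simp) ?_
            intro p hp
            rcases List.mem_cons.mp hp with h | h
            · subst h; simpa using hcur
            · exact hacc _ h
          · simp only [hcn, if_false]
            refine ih rest (c :: cur) acc (by simpa using hf) ?_ hacc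
            intro hm
            rcases List.mem_cons.mp hm with h | h
            · exact hcn h.symm
            · exact hcur h

-- splitOn.go with separator ['\n']: number of pieces = accumulated + 1 + '\n'-count
theorem splitOn_go_count (fuel : Nat) (l cur : List Char) (acc : List (List Char))
    (hf : l.length ≤ fuel) :
    (PySem.Chars.splitOn.go ['\n'] fuel l cur acc).length = acc.length + 1 + l.count '\n' := by
  induction fuel generalizing l cur acc with
  | zero =>
      have hl : l = [] := by cases l <;> simp_all
      subst hl
      rw [splitOn_go_nl_zero]; simp
  | succ fuel ih =>
      cases l with
      | nil => rw [splitOn_go_nl_nil]; simp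
      | cons c rest =>
          rw [splitOn_go_nl_cons]
          by_cases hcn : c = '\n'
          · subst hcn
            simp only [if_true]
            rw [ih rest [] (cur.reverse :: acc) (by simpa using hf)]
            simp [List.count_cons]
            omega
          · simp only [hcn, if_false]
            rw [ih rest (c :: cur) acc (by simpa using hf)]
            simp [List.count_cons, hcn]

-- one-step equations of count's worker at pattern ['\n']
theorem count_go_nl_zero (l : List Char) (acc : Nat) :
    PySem.Chars.count.go ['\n'] 0 l acc = acc := by
  rw [PySem.Chars.count.go.eq_def]

theorem count_go_nl_nil (fuel : Nat) (acc : Nat) :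
    PySem.Chars.count.go ['\n'] (fuel + 1) [] acc = acc := by
  rw [PySem.Chars.count.go.eq_def]

theorem count_go_nl_cons (fuel : Nat) (c : Char) (rest : List Char) (acc : Nat) :
    PySem.Chars.count.go ['\n'] (fuel + 1) (c :: rest) acc
      = if c = '\n' then PySem.Chars.count.go ['\n'] fuel rest (acc + 1)
        else PySem.Chars.count.go ['\n'] fuel rest acc := by
  rw [PySem.Chars.count.go.eq_def]
  by_cases h : c = '\n'
  · subst h; simp [List.isPrefixOf]
  · simp [List.isPrefixOf, h, Ne.symm h]

-- count.go with pattern ['\n'] is List.count '\n'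
theorem count_go_nl (fuel : Nat) (l : List Char) (acc : Nat) (hf : l.length ≤ fuel) :
    PySem.Chars.count.go ['\n'] fuel l acc = acc + l.count '\n' := by
  induction fuel generalizing l acc with
  | zero =>
      have hl : l = [] := by cases l <;> simp_all
      subst hl
      rw [count_go_nl_zero]; simp
  | succ fuel ih =>
      cases l with
      | nil => rw [count_go_nl_nil]; simp
      | cons c rest =>
          rw [count_go_nl_cons]
          by_cases hcn : c = '\n'
          · subst hcn
            simp only [if_true]
            rw [ih rest (acc + 1) (by simpa using hf)]
            simp [List.count_cons]; omega
          · simp only [hcn, if_false]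
            rw [ih rest acc (by simpa using hf)]
            simp [List.count_cons, hcn]

-- A's dead filter never removes a piece, so split_articles counts '\n'-separated pieces
theorem split_articles_nl (s : String) :
    ((split_articles s "\n").length : Int) = (PySem.Str.count s "\n" : Int) + 1 := by
  have hsep : ("\n" : String).toList = ['\n'] := by decide
  have hpieces := splitOn_go_no_nl (s.toList.length + 1) s.toList [] []
      (by omega) (by simp) (by simp)
  have hfilter : (((PySem.Chars.splitOn s.toList ['\n']).map String.ofList).filter
      (fun article => article != "\n" && article != " \n"))
      = (PySem.Chars.splitOn s.toList ['\n']).map String.ofList := by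
    apply List.filter_eq_self.mpr
    intro p hp
    rcases List.mem_map.mp hp with ⟨cs, hcs, rfl⟩
    have hno : '\n' ∉ cs := hpieces cs (by simpa [PySem.Chars.splitOn] using hcs)
    have h1 : String.ofList cs ≠ "\n" := by
      intro h
      have h' := congrArg String.toList h
      simp only [String.toList_ofList, hsep] at h'
      subst h'; simp at hno
    have h2 : String.ofList cs ≠ " \n" := by
      intro h
      have h' := congrArg String.toList h
      have hsep2 : (" \n" : String).toList = [' ', '\n'] := by decide
      simp only [String.toList_ofList, hsep2] at h'
      subst h'; simp at hno
    simp [h1, h2]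
  have hlen : (PySem.Chars.splitOn s.toList ['\n']).length = 1 + s.toList.count '\n' := by
    have h := splitOn_go_count (s.toList.length + 1) s.toList [] [] (by omega)
    simpa [PySem.Chars.splitOn] using h
  have hcount : PySem.Str.count s "\n" = s.toList.count '\n' := by
    rw [PySem.Str.count, hsep, PySem.Chars.count]
    simp only [List.isEmpty_cons, Bool.false_eq_true, if_false]
    simpa using count_go_nl s.toList.length s.toList 0 (le_refl _)
  rw [split_articles, PySem.Str.split?, PySem.Chars.split?, hsep]
  simp only [List.isEmpty_cons, Bool.false_eq_true, if_false, Option.map_some, Option.getD_some]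
  rw [hfilter, List.length_map, hlen, hcount]
  push_cast
  ring

-- A-side value 1: len(' '.join(articles))
theorem valA_chars (articles : List String) :
    PySem.Str.len (PySem.Str.join " " articles)
      = (if articles.isEmpty then sumChars articles
         else sumChars articles + (articles.length : Int) - 1) := by
  have hsp : (" " : String).toList = [' '] := by decide
  have hsum : sumChars articles = (((articles.map String.toList).map List.length).sum : Nat) := by
    simp only [sumChars, PySem.Str.len, List.map_map, Function.comp]
    induction articles with
    | nil => simp
    | cons a l ih => simp [ih]
  cases articles with
  | nil =>
      simp [PySem.Str.len, PySem.Str.join, PySem.Chars.join, List.intercalate, sumChars]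
  | cons a l =>
      have hne : (a :: l).map String.toList ≠ [] := by simp
      have h := length_intercalate_space ((a :: l).map String.toList) hne
      simp only [PySem.Str.len, PySem.Str.join, String.toList_ofList, PySem.Chars.join, hsp,
        List.isEmpty_cons, Bool.false_eq_true, if_false]
      rw [hsum]
      have hlen : ((a :: l).map String.toList).length = (a :: l).length := by simp
      rw [hlen] at h
      omega

-- A-side value 2: len(' '.join(articles).split())
theorem valA_toks (articles : List String) :
    ((PySem.Str.split₀ (PySem.Str.join " " articles)).length : Int) = sumToks articles := by
  have hsp : (" " : String).toList = [' '] := by decide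
  have h := split0_intercalate (articles.map String.toList)
  simp only [PySem.Str.split₀, List.length_map, PySem.Str.join, String.toList_ofList,
    PySem.Chars.join, hsp]
  rw [h, sumToks, Nat.cast_list_sum]
  simp [List.map_map, Function.comp_def, PySem.Str.split₀]

-- A-side value 3: the summed sentence counts
theorem valA_sents (articles : List String) :
    (articles.map (fun art => ((split_articles art "\n").length : Int))).sum
      = sumSents articles := by
  rw [sumSents]
  congr 1
  exact List.map_congr_left (fun a _ => split_articles_nl a)

-- ===== VERDICT (by name: the statement is the Claim_ definition above) =====
theorem corpus_figures_spec : Claim_equal_corpus_figures := by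
  intro articles prefix_ _
  unfold Spec_corpus_figures corpus_figures corpus_figures_alt
  rw [valB_fold]
  simp only [valA_chars, valA_toks, valA_sents, zero_add]
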